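-- pv_equiv track=rewrite | github.com/2dsupervip/2dsupervip | app.py | gatekeeper_replace
-- ===== SOURCE A (Python) =====
-- def gatekeeper_replace(gap_list, trend_list):
--     clean_list = []
--     for g in gap_list:
--         if g in trend_list: clean_list.append(g)
--         else:
--             for t in trend_list:
--                 if t not in clean_list:
--                     clean_list.append(t); break
--     return clean_list
-- ===== SOURCE B (Python) =====
-- def gatekeeper_replace(gap_list, trend_list):
--     # One pass: set membership instead of list scans, and a monotone pointer
--     # that finds the first trend element not yet in the output.  O(n+m).
--     trend_set = set(trend_list)
--     seen = set()
--     out = []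
--     p = 0
--     n = len(trend_list)
--     for g in gap_list:
--         if g in trend_set:
--             out.append(g)
--             seen.add(g)
--         else:
--             while p < n and trend_list[p] in seen:
--                 p += 1
--             if p < n:
--                 t = trend_list[p]
--                 out.append(t)
--                 seen.add(t)
--     return out
-- ===== Notes on version B (the rewrite author's own statement) =====
-- stated objective: faster
-- what changed: Replaced A's per-element list scans (membership in trend_list, and an inner scan of trend_list against the growing output) by a precomputed trend set, a seen set and a monotone pointer into trend_list that finds the first unused trend element in amortized O(1).
import Mathlib
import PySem

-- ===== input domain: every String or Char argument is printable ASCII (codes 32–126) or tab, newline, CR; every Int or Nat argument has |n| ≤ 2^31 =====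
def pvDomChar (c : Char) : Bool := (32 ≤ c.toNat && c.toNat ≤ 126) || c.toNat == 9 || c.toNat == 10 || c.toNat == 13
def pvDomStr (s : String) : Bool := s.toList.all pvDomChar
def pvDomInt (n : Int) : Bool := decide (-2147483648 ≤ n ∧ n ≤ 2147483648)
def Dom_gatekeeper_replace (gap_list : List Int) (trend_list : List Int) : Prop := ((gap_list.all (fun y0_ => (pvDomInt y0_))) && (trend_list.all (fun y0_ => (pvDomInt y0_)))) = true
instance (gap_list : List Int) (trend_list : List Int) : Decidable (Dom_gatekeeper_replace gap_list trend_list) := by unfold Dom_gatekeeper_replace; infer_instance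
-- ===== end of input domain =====

-- B replaces A's nested list scans by a trend set, a seen set and a monotone
-- pointer into trend_list (objective: faster, O(n+m) instead of O(n*m)).

-- ===== PORT A =====
-- inner 'for t in trend_list: if t not in clean_list: append; break'
def firstNotIn : List Int → List Int → Option Int
  | [], _ => none
  | t :: ts, acc => if t ∈ acc then firstNotIn ts acc else some t

def gatekeeper_replace (gap_list : List Int) (trend_list : List Int) : List Int :=
  gap_list.foldl (fun clean g =>
    if g ∈ trend_list then clean ++ [g]
    else match firstNotIn trend_list clean with
      | some t => clean ++ [t]
      | none => clean) []

-- ===== PORT B =====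
-- 'while p < n and trend_list[p] in seen: p += 1'
def gkAdvance (trend : List Int) (seen : PySem.Set Int) (p : Nat) : Nat :=
  if h : p < trend.length then
    if trend[p] ∈ seen then gkAdvance trend seen (p + 1) else p
  else p
termination_by trend.length - p

-- one iteration of B's 'for g in gap_list' loop over state (out, seen, p)
def gkStep (trend : List Int) (tset : PySem.Set Int)
    (st : List Int × PySem.Set Int × Nat) (g : Int) : List Int × PySem.Set Int × Nat :=
  let (out, seen, p) := st
  if g ∈ tset then (out ++ [g], PySem.Set.add seen g, p)
  else
    let p' := gkAdvance trend seen p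
    if h : p' < trend.length then
      (out ++ [trend[p']], PySem.Set.add seen trend[p'], p')
    else (out, seen, p')

def gatekeeper_replace_alt (gap_list : List Int) (trend_list : List Int) : List Int :=
  (gap_list.foldl (gkStep trend_list (PySem.Set.ofList trend_list)) ([], PySem.Set.empty, 0)).1

-- ===== PRECONDITION & SPEC =====
def Spec_gatekeeper_replace (gap_list : List Int) (trend_list : List Int) (out : List Int) : Prop := out = gatekeeper_replace_alt gap_list trend_list
instance (gap_list : List Int) (trend_list : List Int) (out : List Int) : Decidable (Spec_gatekeeper_replace gap_list trend_list out) := by unfold Spec_gatekeeper_replace; infer_instance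

-- ===== CLAIM (what is proved, stated in full; the proofs are below) =====
def Claim_equal_gatekeeper_replace : Prop := ∀ (gap_list : List Int) (trend_list : List Int), Dom_gatekeeper_replace gap_list trend_list → Spec_gatekeeper_replace gap_list trend_list (gatekeeper_replace gap_list trend_list)

-- ===== LEMMAS AND PROOFS =====

-- prefix invariant: every trend element strictly before the pointer is already in out
def gkInv (trend out : List Int) (p : Nat) : Prop :=
  ∀ i, (hi : i < trend.length) → i < p → trend[i] ∈ out

theorem gkInv_mono {trend out : List Int} {p : Nat} (h : gkInv trend out p) (x : Int) :
    gkInv trend (out ++ [x]) p := fun i hi hip => List.mem_append_left _ (h i hi hip)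

theorem gkAdvance_inv {trend out : List Int} {seen : PySem.Set Int} {p : Nat}
    (hmem : ∀ x : Int, x ∈ seen ↔ x ∈ out) (hinv : gkInv trend out p) :
    gkInv trend out (gkAdvance trend seen p) := by
  induction p using gkAdvance.induct (trend := trend) (seen := seen) with
  | case1 p h hm ih =>
    rw [gkAdvance]; simp [h, hm]
    refine ih ?_
    intro i hi hip
    rcases Nat.lt_or_ge i p with hlt | hge
    · exact hinv i hi hlt
    · have : i = p := by omega
      subst this; exact (hmem _).mp hm
  | case2 p h hm => rw [gkAdvance]; simpa [h, hm] using hinv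
  | case3 p h => rw [gkAdvance]; simpa [h] using hinv

-- dropping an already-covered prefix does not change A's inner search
theorem firstNotIn_drop (trend out : List Int) (p : Nat) (hinv : gkInv trend out p) :
    firstNotIn trend out = firstNotIn (trend.drop p) out := by
  induction p with
  | zero => simp
  | succ q ih =>
    by_cases h : q < trend.length
    · have hq : gkInv trend out q := fun i hi hip => hinv i hi (by omega)
      rw [ih hq]
      rw [← List.getElem_cons_drop h]
      have : trend[q] ∈ out := hinv q h (by omega)
      simp [firstNotIn, this]
    · rw [ih (fun i hi hip => hinv i hi (by omega))]
      rw [List.drop_eq_nil_of_le (by omega), List.drop_eq_nil_of_le (by omega)]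

-- the pointer after the while-loop identifies exactly A's inner-loop result
theorem gkAdvance_spec (trend out : List Int) (seen : PySem.Set Int)
    (hmem : ∀ x : Int, x ∈ seen ↔ x ∈ out) :
    ∀ p, firstNotIn (trend.drop p) out =
      (if h : gkAdvance trend seen p < trend.length then some trend[gkAdvance trend seen p] else none) := by
  intro p
  induction p using gkAdvance.induct (trend := trend) (seen := seen) with
  | case1 p h hm ih =>
    rw [gkAdvance]; simp only [h, hm, if_true, dif_pos]
    rw [← ih, ← List.getElem_cons_drop h]
    simp [firstNotIn, (hmem _).mp hm]
  | case2 p h hm =>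
    rw [gkAdvance]; simp only [h, hm, if_false, dif_pos]
    rw [← List.getElem_cons_drop h]
    have : trend[p] ∉ out := fun hc => hm ((hmem _).mpr hc)
    simp [firstNotIn, this]
  | case3 p h =>
    rw [gkAdvance]; simp only [h]
    rw [List.drop_eq_nil_of_le (by omega)]
    simp [firstNotIn, h]

theorem gk_main (trend : List Int) :
    ∀ (gs out : List Int) (seen : PySem.Set Int) (p : Nat),
      (∀ x : Int, x ∈ seen ↔ x ∈ out) → gkInv trend out p →
      gs.foldl (fun clean g =>
        if g ∈ trend then clean ++ [g]
        else match firstNotIn trend clean with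
          | some t => clean ++ [t]
          | none => clean) out
      = (gs.foldl (gkStep trend (PySem.Set.ofList trend)) (out, seen, p)).1 := by
  intro gs
  induction gs with
  | nil => intro out seen p _ _; rfl
  | cons g gs ih =>
    intro out seen p hmem hinv
    simp only [List.foldl_cons]
    by_cases hg : g ∈ trend
    · have hg' : g ∈ PySem.Set.ofList trend := by
        simpa [PySem.Set.mem_ofList] using hg
      rw [gkStep]
      simp only [hg, hg', if_true]
      refine ih _ _ _ ?_ (gkInv_mono hinv g)
      intro x; simp [PySem.Set.mem_add, hmem x, or_comm]
    · have hg' : g ∉ PySem.Set.ofList trend := by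
        simpa [PySem.Set.mem_ofList] using hg
      rw [gkStep]
      simp only [hg, hg', if_false]
      have hfd := firstNotIn_drop trend out p hinv
      have hsp := gkAdvance_spec trend out seen hmem p
      have hinv' : gkInv trend out (gkAdvance trend seen p) := gkAdvance_inv hmem hinv
      by_cases h : gkAdvance trend seen p < trend.length
      · simp only [h, dif_pos] at hsp ⊢
        rw [hfd, hsp]
        refine ih _ _ _ ?_ (gkInv_mono hinv' _)
        intro x; simp [PySem.Set.mem_add, hmem x, or_comm]
      · simp only [h, dif_neg, not_false_iff] at hsp ⊢
        rw [hfd, hsp]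
        exact ih _ _ _ hmem hinv'

-- ===== VERDICT (by name: the statement is the Claim_ definition above) =====
theorem gatekeeper_replace_spec : Claim_equal_gatekeeper_replace := by
  intro gap trend _
  show gatekeeper_replace gap trend = gatekeeper_replace_alt gap trend
  unfold gatekeeper_replace gatekeeper_replace_alt
  exact gk_main trend gap [] PySem.Set.empty 0
    (fun x => by simp [PySem.Set.empty]) (fun i hi hip => by omega)
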